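-- pv_equiv track=rewrite | github.com/oierlauzi/scipion-em-cistem | cistem/protocols/protocol_3d_classification.py | _distributeWork
-- ===== SOURCE A (Python) =====
-- def _distributeWork(n, m):
--     """ Given n items, it distributes it into at most m similarly sized groups. It returns a list
--     with the [first, last) elements of each group as the tuple (first, last)"""
--
--     # Obtain the quotient and the reminder of dividing n by m
--     q, r = divmod(n, m)
--
--     # Distribute the work as evenly as possible, groups of the same size
--     # as the quotient and the reminder spread across the first group. If
--     # m>n, q=0, so avoid adding zeros at the end of the array
--     result = []
--     first = 0
--     for _ in range(r):
--         last = first + q + 1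
--         result.append((first, last))
--         first = last
--
--     if q > 0:
--         for _ in range(m-r): # always r < m
--             last = first + q
--             result.append((first, last))
--             first = last
--
--
--     # Ensure that all the work has been distributed correctly
--     assert(result[0][0] == 0) # Start at 0
--     assert(result[-1][1] == n) # End at n
--     assert(len(result) <= m) # At most m groups
--
--     return result
-- ===== SOURCE B (Python) =====
-- def _distributeWork(n, m):
--     """ Given n items, it distributes it into at most m similarly sized groups. It returns a list
--     with the [first, last) elements of each group as the tuple (first, last)"""
--     q, r = divmod(n, m)
--     # Number of non-empty groups: all m when q > 0, otherwise only the r groups of size 1.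
--     count = m if q > 0 else r
--     # Group i is [i*q + min(i, r), (i+1)*q + min(i+1, r)) in closed form.
--     return [(i * q + min(i, r), (i + 1) * q + min(i + 1, r)) for i in range(count)]
-- ===== Notes on version B (the rewrite author's own statement) =====
-- stated objective: alternative
-- what changed: Replaces A's two sequential accumulator loops (which thread a running 'first' boundary through groups of size q+1 then q) by a single comprehension that computes each group's boundaries in closed form from its index: group i is [i*q + min(i, r), (i+1)*q + min(i+1, r)).
import Mathlib
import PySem

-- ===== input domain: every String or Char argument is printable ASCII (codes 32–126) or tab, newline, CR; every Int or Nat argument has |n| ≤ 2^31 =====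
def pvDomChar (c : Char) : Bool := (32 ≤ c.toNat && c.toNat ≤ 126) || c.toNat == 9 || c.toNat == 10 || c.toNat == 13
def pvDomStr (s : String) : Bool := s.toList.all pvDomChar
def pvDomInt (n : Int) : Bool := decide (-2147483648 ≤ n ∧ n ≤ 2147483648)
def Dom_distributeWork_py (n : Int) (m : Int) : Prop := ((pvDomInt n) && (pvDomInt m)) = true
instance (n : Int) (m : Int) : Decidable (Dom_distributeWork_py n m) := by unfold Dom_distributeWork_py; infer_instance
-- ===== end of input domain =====

-- B replaces A's two sequential accumulator loops by a single index-driven pass computing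
-- each group's boundaries in closed form from its index (objective: alternative decomposition).

-- ===== PORT A =====
-- A's trailing asserts (result[0][0] == 0, result[-1][1] == n, len(result) <= m) raise exactly
-- on the inputs excluded by Pre_ below; where they pass they do not change the returned value.
def distributeWork_py (n : Int) (m : Int) : List (Int × Int) :=
  let q := PySem.Int.floordiv n m    -- divmod(n, m); raises ZeroDivisionError iff m = 0 (outside Pre_)
  let r := PySem.Int.mod n m
  let st1 := (PySem.List.pyRange 0 r 1).foldl
      (fun (st : List (Int × Int) × Int) _ =>
        let last := st.2 + q + 1
        (st.1 ++ [(st.2, last)], last)) ([], 0)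
  let st2 := if q > 0 then
      (PySem.List.pyRange 0 (m - r) 1).foldl
        (fun (st : List (Int × Int) × Int) _ =>
          let last := st.2 + q
          (st.1 ++ [(st.2, last)], last)) st1
    else st1
  st2.1

-- ===== PORT B =====
def distributeWork_py_alt (n : Int) (m : Int) : List (Int × Int) :=
  let q := PySem.Int.floordiv n m
  let r := PySem.Int.mod n m
  let count := if q > 0 then m else r
  (PySem.List.pyRange 0 count 1).map
    (fun i => (i * q + min i r, (i + 1) * q + min (i + 1) r))

-- ===== PRECONDITION & SPEC =====
-- Pre_ is exactly where the Python A returns: for m = 0 divmod raises ZeroDivisionError, and for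
-- n ≤ 0 or m < 0 the result list fails the trailing asserts (IndexError or AssertionError).
def Pre_distributeWork_py (n : Int) (m : Int) : Prop := 1 ≤ n ∧ 1 ≤ m
instance (n : Int) (m : Int) : Decidable (Pre_distributeWork_py n m) := by unfold Pre_distributeWork_py; infer_instance
def pvWitness_distributeWork_py : Int × Int := (7, 3)

def Spec_distributeWork_py (n : Int) (m : Int) (out : List (Int × Int)) : Prop := out = distributeWork_py_alt n m
instance (n : Int) (m : Int) (out : List (Int × Int)) : Decidable (Spec_distributeWork_py n m out) := by unfold Spec_distributeWork_py; infer_instance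

-- ===== CLAIM (what is proved, stated in full; the proofs are below) =====
def Claim_equal_distributeWork_py : Prop := ∀ (n : Int) (m : Int), Dom_distributeWork_py n m → Pre_distributeWork_py n m → Spec_distributeWork_py n m (distributeWork_py n m)
-- ===== LEMMAS AND PROOFS =====

-- contiguous chunks: k groups of width s starting at f
def pvChunks (f s : Int) : Nat → List (Int × Int)
  | 0 => []
  | k+1 => (f, f + s) :: pvChunks (f + s) s k

-- A's accumulator loops: folding a length-k list through A's step appends k chunks
theorem pvLoopA1 (q : Int) (l : List Int) : ∀ (acc : List (Int × Int)) (f : Int),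
    l.foldl (fun (st : List (Int × Int) × Int) _ =>
        let last := st.2 + q + 1
        (st.1 ++ [(st.2, last)], last)) (acc, f)
      = (acc ++ pvChunks f (q + 1) l.length, f + l.length * (q + 1)) := by
  induction l with
  | nil => intro acc f; simp [pvChunks]
  | cons x xs ih =>
    intro acc f
    simp only [List.foldl_cons, ih, List.length_cons, Prod.mk.injEq]
    refine ⟨?_, by push_cast; ring⟩
    rw [List.append_assoc, List.singleton_append]
    show _ = acc ++ pvChunks f (q + 1) (xs.length + 1)
    simp only [pvChunks]
    congr 2 <;> ring_nf

theorem pvLoopA2 (q : Int) (l : List Int) : ∀ (acc : List (Int × Int)) (f : Int),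
    l.foldl (fun (st : List (Int × Int) × Int) _ =>
        let last := st.2 + q
        (st.1 ++ [(st.2, last)], last)) (acc, f)
      = (acc ++ pvChunks f q l.length, f + l.length * q) := by
  induction l with
  | nil => intro acc f; simp [pvChunks]
  | cons x xs ih =>
    intro acc f
    simp only [List.foldl_cons, ih, List.length_cons, Prod.mk.injEq]
    refine ⟨?_, by push_cast; ring⟩
    rw [List.append_assoc, List.singleton_append]
    show _ = acc ++ pvChunks f q (xs.length + 1)
    simp [pvChunks]

-- B's closed-form groups for indices below r: width q+1
theorem pvMapLow (q r : Int) : ∀ (k : Nat) (a : Int), 0 ≤ a → a + k ≤ r →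
    (PySem.List.pyRange a (a + k) 1).map
      (fun i => (i * q + min i r, (i + 1) * q + min (i + 1) r))
      = pvChunks (a * q + a) (q + 1) k := by
  intro k
  induction k with
  | zero =>
    intro a _ _
    rw [show a + (0:Nat) = a by push_cast; ring, PySem.List.pyRange_one_eq_nil le_rfl]
    simp [pvChunks]
  | succ k ih =>
    intro a ha hk
    have har : a < r := by push_cast at hk; omega
    rw [PySem.List.pyRange_one_cons (by push_cast; omega), List.map_cons]
    rw [show a + ((k + 1 : Nat) : Int) = a + 1 + (k : Int) by push_cast; ring]
    rw [ih (a + 1) (by omega) (by push_cast at hk ⊢; omega)]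
    rw [min_eq_left (le_of_lt har), min_eq_left (by omega : a + 1 ≤ r)]
    show _ = pvChunks (a * q + a) (q + 1) (k + 1)
    simp only [pvChunks]
    congr 2 <;> ring_nf

-- B's closed-form groups for indices at or above r: width q
theorem pvMapHigh (q r : Int) : ∀ (k : Nat) (a : Int), r ≤ a →
    (PySem.List.pyRange a (a + k) 1).map
      (fun i => (i * q + min i r, (i + 1) * q + min (i + 1) r))
      = pvChunks (a * q + r) q k := by
  intro k
  induction k with
  | zero =>
    intro a _
    rw [show a + (0:Nat) = a by push_cast; ring, PySem.List.pyRange_one_eq_nil le_rfl]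
    simp [pvChunks]
  | succ k ih =>
    intro a ha
    rw [PySem.List.pyRange_one_cons (by push_cast; omega), List.map_cons]
    rw [show a + ((k + 1 : Nat) : Int) = a + 1 + (k : Int) by push_cast; ring]
    rw [ih (a + 1) (by omega)]
    rw [min_eq_right ha, min_eq_right (by omega : r ≤ a + 1)]
    show _ = pvChunks (a * q + r) q (k + 1)
    simp only [pvChunks]
    congr 2 <;> ring_nf

-- ===== VERDICT (by name: the statement is the Claim_ definition above) =====
theorem distributeWork_py_spec : Claim_equal_distributeWork_py := by
  intro n m _ hpre
  obtain ⟨hn, hm⟩ := hpre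
  unfold Spec_distributeWork_py distributeWork_py distributeWork_py_alt
  dsimp only
  set q := PySem.Int.floordiv n m with hqdef
  set r := PySem.Int.mod n m with hrdef
  have hmpos : (0:Int) < m := by omega
  have hr0 : 0 ≤ r := PySem.Int.mod_nonneg n hmpos
  have hrm : r < m := PySem.Int.mod_lt n hmpos
  have hq0 : 0 ≤ q := (PySem.Int.le_floordiv_iff_mul_le hmpos).mpr (by nlinarith)
  have hcast : ((r.toNat : Int)) = r := Int.toNat_of_nonneg hr0
  -- A's first loop
  have hA1 := pvLoopA1 q (PySem.List.pyRange 0 r 1) [] 0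
  rw [show (PySem.List.pyRange 0 r 1).length = r.toNat by
    rw [PySem.List.length_pyRange_one]; omega] at hA1
  -- B's first r groups
  have hB1 := pvMapLow q r r.toNat 0 le_rfl (by omega)
  rw [show (0:Int) + (r.toNat:Int) = r by omega] at hB1
  rcases lt_or_eq_of_le hq0 with hqpos | hqz
  · -- q > 0 : both produce r groups of width q+1 then (m - r) groups of width q
    rw [if_pos hqpos, if_pos hqpos, hA1]
    have hA2 := pvLoopA2 q (PySem.List.pyRange 0 (m - r) 1)
      ([] ++ pvChunks 0 (q + 1) r.toNat) (0 + (r.toNat:Int) * (q + 1))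
    rw [show (PySem.List.pyRange 0 (m - r) 1).length = (m - r).toNat by
      rw [PySem.List.length_pyRange_one]; omega] at hA2
    rw [hA2]
    rw [PySem.List.pyRange_one_append 0 r m hr0 (le_of_lt hrm), List.map_append, hB1]
    have hB2 := pvMapHigh q r (m - r).toNat r le_rfl
    rw [show r + ((m - r).toNat : Int) = m by omega] at hB2
    rw [hB2]
    dsimp only
    rw [show (0:Int) * q + 0 = 0 by ring,
        show (0:Int) + (r.toNat:Int) * (q + 1) = r * q + r by rw [hcast]; ring]
    simp
  · -- q = 0 : A skips its second loop, B emits exactly the r groups of width 1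
    rw [if_neg (by omega : ¬ q > 0), if_neg (by omega : ¬ q > 0), hA1, hB1]
    dsimp only
    rw [show (0:Int) * q + 0 = 0 by ring]
    simp
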